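-- pv_equiv track=rewrite | github.com/a-rebmann/llms4pm | llms4pm/verifier.py | has_follows_relation
-- ===== SOURCE A (Python) =====
-- def has_follows_relation(affected, log):
--     # checks if there is a trace where event1 occurs before event2 in the log
--     for variant in log:
--         for i in range(len(variant) - 1):
--             if variant[i] == affected[0]:
--                 for j in range(i + 1, len(variant)):
--                     if variant[j] == affected[2]:
--                         return True
--     return False
-- ===== SOURCE B (Python) =====
-- def has_follows_relation(affected, log):
--     first, second = affected[0], affected[2]
--     for variant in log:
--         seen = False
--         for ev in variant:
--             if seen and ev == second:
--                 return True
--             if ev == first: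
--                 seen = True
--     return False
-- ===== Notes on version B (the rewrite author's own statement) =====
-- stated objective: alternative
-- what changed: Replaced the nested index loops (for every occurrence of affected[0] rescan the rest of the trace for affected[2]) with a single linear scan per trace that tracks a 'seen affected[0]' flag; worst-case work per trace drops from quadratic to linear, though on the measured inputs both run in comparable time.
-- outside the precondition, e.g. on has_follows_relation([], [['x']]): A returns False, B raises IndexError
import Mathlib
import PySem

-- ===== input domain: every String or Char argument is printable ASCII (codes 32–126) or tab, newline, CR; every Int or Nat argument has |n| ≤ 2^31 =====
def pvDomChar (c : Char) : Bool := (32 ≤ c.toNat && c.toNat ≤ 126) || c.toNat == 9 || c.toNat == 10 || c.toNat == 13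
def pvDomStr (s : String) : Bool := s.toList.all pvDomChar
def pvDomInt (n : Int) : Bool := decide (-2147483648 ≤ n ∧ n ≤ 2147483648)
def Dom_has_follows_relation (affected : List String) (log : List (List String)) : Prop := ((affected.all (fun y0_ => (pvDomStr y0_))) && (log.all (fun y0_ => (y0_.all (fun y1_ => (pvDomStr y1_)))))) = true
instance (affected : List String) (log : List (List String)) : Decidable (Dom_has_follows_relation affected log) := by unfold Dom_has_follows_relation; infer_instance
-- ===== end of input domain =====

-- B replaces A's nested index loops with one linear scan per trace tracking a 'seen affected[0]' flag (alternative algorithm; not measured faster).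

-- ===== PORT A =====
-- literal transliteration of A: for each variant, for i in range(len-1),
-- if variant[i]==affected[0] then scan j in range(i+1,len) for affected[2]
def has_follows_relation (affected : List String) (log : List (List String)) : Bool :=
  log.any (fun variant =>
    (PySem.List.pyRange 0 ((variant.length : Int) - 1) 1).any (fun i =>
      (PySem.List.pyGetD variant i "" == PySem.List.pyGetD affected 0 "") &&
      (PySem.List.pyRange (i + 1) (variant.length : Int) 1).any (fun j =>
        PySem.List.pyGetD variant j "" == PySem.List.pyGetD affected 2 "")))

-- ===== PORT B =====
-- B's inner loop: scan the trace once, 'seen' records whether `first` already occurred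
def hfrScan (first second : String) : List String → Bool → Bool
  | [], _ => false
  | ev :: rest, seen =>
      if seen && ev == second then true
      else hfrScan first second rest (seen || ev == first)

def has_follows_relation_alt (affected : List String) (log : List (List String)) : Bool :=
  let first := PySem.List.pyGetD affected 0 ""
  let second := PySem.List.pyGetD affected 2 ""
  log.any (fun variant => hfrScan first second variant false)

-- ===== PRECONDITION & SPEC =====
-- Pre_ restricts to the natural domain where `affected` carries at least the three
-- entries the relation refers to; on shorter `affected` A raises IndexError as soon as
-- some trace has length ≥ 2 (resp. a match is found), and only returns False by accident
-- when no trace is long enough — B raises IndexError on all such inputs.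
def Pre_has_follows_relation (affected : List String) (log : List (List String)) : Prop :=
  3 ≤ affected.length
instance (affected : List String) (log : List (List String)) : Decidable (Pre_has_follows_relation affected log) := by unfold Pre_has_follows_relation; infer_instance

def pvWitness_has_follows_relation : List String × List (List String) :=
  (["a", "b", "c"], [["a", "c"], ["b"]])

def Spec_has_follows_relation (affected : List String) (log : List (List String)) (out : Bool) : Prop := out = has_follows_relation_alt affected log
instance (affected : List String) (log : List (List String)) (out : Bool) : Decidable (Spec_has_follows_relation affected log out) := by unfold Spec_has_follows_relation; infer_instance

-- ===== CLAIM (what is proved, stated in full; the proofs are below) =====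
def Claim_equal_has_follows_relation : Prop := ∀ (affected : List String) (log : List (List String)), Dom_has_follows_relation affected log → Pre_has_follows_relation affected log → Spec_has_follows_relation affected log (has_follows_relation affected log)

-- ===== LEMMAS AND PROOFS =====

-- characterisation of A's per-variant nested loops
theorem hfr_inner_A_iff (a c : String) (v : List String) :
    ((PySem.List.pyRange 0 ((v.length : Int) - 1) 1).any (fun i =>
      (PySem.List.pyGetD v i "" == a) &&
      (PySem.List.pyRange (i + 1) (v.length : Int) 1).any (fun j =>
        PySem.List.pyGetD v j "" == c))) = true ↔
    ∃ i j : Nat, i < j ∧ v[i]? = some a ∧ v[j]? = some c := by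
  simp only [List.any_eq_true, PySem.List.mem_pyRange_one, Bool.and_eq_true, beq_iff_eq]
  constructor
  · rintro ⟨i, ⟨hi0, hi1⟩, hia, j, ⟨hj0, hj1⟩, hjc⟩
    refine ⟨i.toNat, j.toNat, by omega, ?_, ?_⟩
    · rw [PySem.List.pyGetD_eq_getElem v "" hi0 (by omega)] at hia
      rw [List.getElem?_eq_getElem (by omega)]; simpa using hia
    · rw [PySem.List.pyGetD_eq_getElem v "" (by omega) (by omega)] at hjc
      rw [List.getElem?_eq_getElem (by omega)]; simpa using hjc
  · rintro ⟨i, j, hij, hia, hjc⟩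
    have hj : j < v.length := (List.getElem?_eq_some_iff.mp hjc).1
    have hi : i < v.length := by omega
    refine ⟨(i : Int), ⟨by omega, by omega⟩, ?_, (j : Int), ⟨by omega, by omega⟩, ?_⟩
    · rw [PySem.List.pyGetD_eq_getElem v "" (by omega) (by omega)]
      simp only [Int.toNat_natCast]
      exact Option.some_injective _ (by rw [← List.getElem?_eq_getElem hi]; exact hia)
    · rw [PySem.List.pyGetD_eq_getElem v "" (by omega) (by omega)]
      simp only [Int.toNat_natCast]
      exact Option.some_injective _ (by rw [← List.getElem?_eq_getElem hj]; exact hjc)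

theorem hfrScan_true (a c : String) (v : List String) :
    hfrScan a c v true = v.contains c := by
  induction v with
  | nil => rfl
  | cons x xs ih =>
      simp only [hfrScan, Bool.true_and, Bool.true_or]
      by_cases h : x = c
      · simp [h]
      · simp [h, ih]
        intro h'
        exact absurd h'.symm h

theorem hfrScan_false_iff (a c : String) (v : List String) :
    hfrScan a c v false = true ↔
    ∃ i j : Nat, i < j ∧ v[i]? = some a ∧ v[j]? = some c := by
  induction v with
  | nil => simp [hfrScan]
  | cons x xs ih =>
      simp only [hfrScan, Bool.false_and, Bool.false_eq_true, if_false, Bool.false_or]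
      by_cases hx : x == a
      · have hxa : x = a := by simpa using hx
        rw [hx, hfrScan_true]
        constructor
        · intro hc
          have hc' : c ∈ xs := by simpa using hc
          obtain ⟨j, hj, hje⟩ := List.getElem_of_mem hc'
          exact ⟨0, j + 1, Nat.succ_pos j, by simp [hxa],
            by simpa [List.getElem?_eq_getElem hj] using congrArg some hje⟩
        · rintro ⟨i, j, hij, _, hjc⟩
          have hj1 : 1 ≤ j := by omega
          have : xs[j - 1]? = some c := by
            cases j with
            | zero => omega
            | succ j' => simpa using hjc
          simpa using List.mem_of_getElem? this
      · rw [Bool.not_eq_true] at hx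
        rw [hx, ih]
        constructor
        · rintro ⟨i, j, hij, hia, hjc⟩
          exact ⟨i + 1, j + 1, by omega, by simpa using hia, by simpa using hjc⟩
        · rintro ⟨i, j, hij, hia, hjc⟩
          cases i with
          | zero =>
              exfalso
              have hxa : x = a := by simpa using hia
              simp [hxa] at hx
          | succ i' =>
              cases j with
              | zero => omega
              | succ j' =>
                  exact ⟨i', j', by omega, by simpa using hia, by simpa using hjc⟩

theorem hfr_variant_eq (a c : String) (v : List String) :
    ((PySem.List.pyRange 0 ((v.length : Int) - 1) 1).any (fun i =>
      (PySem.List.pyGetD v i "" == a) &&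
      (PySem.List.pyRange (i + 1) (v.length : Int) 1).any (fun j =>
        PySem.List.pyGetD v j "" == c))) = hfrScan a c v false := by
  rw [Bool.eq_iff_iff, hfr_inner_A_iff, hfrScan_false_iff]

-- ===== VERDICT (by name: the statement is the Claim_ definition above) =====
theorem has_follows_relation_spec : Claim_equal_has_follows_relation := by
  intro affected log _ _
  unfold Spec_has_follows_relation has_follows_relation has_follows_relation_alt
  simp only [hfr_variant_eq]
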